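-- pv_equiv track=rewrite | github.com/Shancoding-design/UR-DataStructure_Algorithm | Exercises_3/Q_queue.py | distribute_IDs_stack
-- ===== SOURCE A (Python) =====
-- def distribute_IDs_stack(num_IDs):
--     ID_stack = []
--     for i in range(1, num_IDs + 1):
--         ID_stack.append(f"ID{i}")
--     distributed_IDs = []
--     while ID_stack:
--         distributed_IDs.append(ID_stack.pop())
--     return distributed_IDs
-- ===== SOURCE B (Python) =====
-- def distribute_IDs_stack(num_IDs):
--     # Single downward pass: emit IDn..ID1 directly, no stack, no second pop loop.
--     distributed_IDs = []
--     i = num_IDs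
--     while i >= 1:
--         distributed_IDs.append(f"ID{i}")
--         i -= 1
--     return distributed_IDs
-- ===== Notes on version B (the rewrite author's own statement) =====
-- stated objective: simpler
-- what changed: One downward loop emits IDn..ID1 directly, eliminating A's intermediate stack and the second while-pop (reversal) pass.
import Mathlib
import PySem

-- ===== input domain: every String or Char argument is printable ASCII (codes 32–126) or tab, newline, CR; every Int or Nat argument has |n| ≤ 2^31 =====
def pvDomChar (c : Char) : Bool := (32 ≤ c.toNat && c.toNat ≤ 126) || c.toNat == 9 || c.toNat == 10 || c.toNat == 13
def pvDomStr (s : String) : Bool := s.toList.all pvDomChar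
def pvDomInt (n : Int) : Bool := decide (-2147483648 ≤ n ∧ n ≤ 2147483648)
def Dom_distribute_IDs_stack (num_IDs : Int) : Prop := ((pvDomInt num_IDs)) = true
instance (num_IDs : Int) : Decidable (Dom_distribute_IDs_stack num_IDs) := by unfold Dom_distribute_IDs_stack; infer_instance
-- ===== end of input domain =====

-- B replaces A's build-then-pop two-phase stack with a single downward loop emitting IDn..ID1 directly (simpler decomposition).


-- ===== PORT A =====
-- the 'while ID_stack: distributed_IDs.append(ID_stack.pop())' loop, popping the last element
def aPopLoop : List String → List String → List String
  | [], acc => acc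
  | x :: xs, acc =>
      aPopLoop (x :: xs).dropLast (acc ++ [(x :: xs).getLast (by simp)])
  termination_by s _ => s.length
  decreasing_by simp

def distribute_IDs_stack (num_IDs : Int) : List String :=
  let ID_stack := (PySem.List.pyRange 1 (num_IDs + 1) 1).foldl
    (fun acc i => acc ++ ["ID" ++ PySem.Int.toStr i]) []
  aPopLoop ID_stack []

-- ===== PORT B =====
-- the 'while i >= 1: append f"ID{i}"; i -= 1' loop
def bDown (i : Int) : List String :=
  if h : 1 ≤ i then ("ID" ++ PySem.Int.toStr i) :: bDown (i - 1) else []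
  termination_by i.toNat
  decreasing_by omega

def distribute_IDs_stack_alt (num_IDs : Int) : List String := bDown num_IDs

-- ===== PRECONDITION & SPEC =====
def Spec_distribute_IDs_stack (num_IDs : Int) (out : List String) : Prop := out = distribute_IDs_stack_alt num_IDs
instance (num_IDs : Int) (out : List String) : Decidable (Spec_distribute_IDs_stack num_IDs out) := by unfold Spec_distribute_IDs_stack; infer_instance

-- ===== CLAIM (what is proved, stated in full; the proofs are below) =====
def Claim_equal_distribute_IDs_stack : Prop := ∀ (num_IDs : Int), Dom_distribute_IDs_stack num_IDs → Spec_distribute_IDs_stack num_IDs (distribute_IDs_stack num_IDs)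

-- ===== LEMMAS AND PROOFS =====

-- the pop loop reverses the stack onto the accumulator
theorem aPopLoop_eq : ∀ (n : Nat) (s acc : List String), s.length = n →
    aPopLoop s acc = acc ++ s.reverse := by
  intro n
  induction n with
  | zero => intro s acc h; cases s with
    | nil => simp [aPopLoop]
    | cons x xs => simp at h
  | succ k ih =>
    intro s acc h
    cases s with
    | nil => simp at h
    | cons x xs =>
      rw [aPopLoop]
      rw [ih _ _ (by simpa using h)]
      have hne : x :: xs ≠ [] := by simp
      have := List.dropLast_append_getLast hne
      conv_rhs => rw [← this]
      simp

-- B's downward loop produces the reverse of the ascending map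
theorem bDown_eq : ∀ (k : Nat) (n : Int), n.toNat = k →
    bDown n = ((PySem.List.pyRange 1 (n + 1) 1).map
      (fun i => "ID" ++ PySem.Int.toStr i)).reverse := by
  intro k
  induction k with
  | zero =>
    intro n h
    rw [bDown]
    rw [PySem.List.pyRange_one_eq_nil (by omega)]
    simp
    omega
  | succ m ih =>
    intro n h
    rw [bDown]
    rw [dif_pos (by omega : (1:Int) ≤ n)]
    rw [PySem.List.pyRange_one_succ_right (by omega : (1:Int) ≤ n)]
    rw [ih (n - 1) (by omega)]
    simp

-- ===== VERDICT (by name: the statement is the Claim_ definition above) =====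
theorem distribute_IDs_stack_spec : Claim_equal_distribute_IDs_stack := by
  intro n _
  unfold Spec_distribute_IDs_stack distribute_IDs_stack distribute_IDs_stack_alt
  rw [PySem.List.foldl_append_singleton_eq_map]
  rw [aPopLoop_eq _ _ _ rfl, bDown_eq n.toNat n rfl]
  simp
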